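-- pv_equiv track=rewrite | github.com/mikekozlov/cv-search-poc | src/cv_search/app/streamlit_results.py | _split_domain_blocks
-- ===== SOURCE A (Python) =====
-- def _split_domain_blocks(text: str) -> list[str]:
--     lines = [ln for ln in text.splitlines() if ln.strip()]
--     if not lines:
--         return []
--
--     blocks: list[list[str]] = []
--     current: list[str] = []
--     for line in lines:
--         lower = line.strip().lower()
--         starts_new = lower.startswith("domains:") or lower.startswith("tech:")
--         if starts_new and current:
--             blocks.append(current)
--             current = []
--         current.append(line)
--
--     if current:
--         blocks.append(current)
--
--     return ["\n".join(block) for block in blocks if block]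
-- ===== SOURCE B (Python) =====
-- def _split_domain_blocks(text: str) -> list[str]:
--     lines = [ln for ln in text.splitlines() if ln.strip()]
--     if not lines:
--         return []
--     idxs = [i for i, ln in enumerate(lines)
--             if i > 0 and ln.strip().lower().startswith(("domains:", "tech:"))]
--     bounds = [0] + idxs + [len(lines)]
--     return ["\n".join(lines[a:b]) for a, b in zip(bounds, bounds[1:])]
-- ===== Notes on version B (the rewrite author's own statement) =====
-- stated objective: simpler
-- what changed: Replaces A's stateful accumulator loop (flush current block on each marker) by one pass collecting the boundary indices of marker lines (index > 0), then slicing the line list between consecutive boundaries and joining each slice.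
import Mathlib
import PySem

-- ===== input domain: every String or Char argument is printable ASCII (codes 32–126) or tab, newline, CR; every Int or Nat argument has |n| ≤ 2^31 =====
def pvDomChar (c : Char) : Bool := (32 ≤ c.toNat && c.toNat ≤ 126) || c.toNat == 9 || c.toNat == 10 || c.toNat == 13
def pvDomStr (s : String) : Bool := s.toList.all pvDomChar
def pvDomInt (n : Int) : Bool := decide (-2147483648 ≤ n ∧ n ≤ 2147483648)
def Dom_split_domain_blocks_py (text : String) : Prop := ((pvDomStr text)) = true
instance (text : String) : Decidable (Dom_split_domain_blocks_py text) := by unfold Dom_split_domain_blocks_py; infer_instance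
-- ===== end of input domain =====

-- B replaces A's stateful accumulator loop by boundary indices + slicing; simpler decomposition, equal return value proved on the whole domain.


-- ===== PORT A =====
-- literal port of A: keep non-empty lines, then one accumulator loop that flushes `current`
-- whenever a marker line ("domains:"/"tech:" after strip().lower()) is met and `current` is non-empty.
def split_domain_blocks_py (text : String) : List String :=
  let lines := (PySem.Str.splitlines text).filter (fun ln => PySem.Str.strip ln != "")
  if lines = [] then []
  else
    let st := lines.foldl
      (fun (s : List (List String) × List String) line =>
        let lower := PySem.Str.lower (PySem.Str.strip line)
        let starts_new := PySem.Str.startswith lower "domains:" || PySem.Str.startswith lower "tech:"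
        if starts_new && !s.2.isEmpty then (s.1 ++ [s.2], [line]) else (s.1, s.2 ++ [line]))
      ([], [])
    let blocks := st.1 ++ (if st.2.isEmpty then [] else [st.2])
    (blocks.filter (fun b => !b.isEmpty)).map (fun b => PySem.Str.join "\n" b)

-- ===== PORT B =====
-- literal port of Source B: boundary indices (index > 0 whose stripped/lowered line starts with a marker),
-- then slices of `lines` between consecutive bounds (Python's startswith on a 2-tuple = the disjunction).
def split_domain_blocks_py_alt (text : String) : List String :=
  let lines := (PySem.Str.splitlines text).filter (fun ln => PySem.Str.strip ln != "")
  if lines.isEmpty then []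
  else
    let idxs := ((PySem.List.enumerate lines 0).filter
      (fun p => decide (0 < p.1) &&
        (PySem.Str.startswith (PySem.Str.lower (PySem.Str.strip p.2)) "domains:" ||
         PySem.Str.startswith (PySem.Str.lower (PySem.Str.strip p.2)) "tech:"))).map (·.1)
    let bounds := 0 :: idxs ++ [(lines.length : Int)]
    (bounds.zip bounds.tail).map
      (fun p => PySem.Str.join "\n" (PySem.List.slice lines (some p.1) (some p.2)))

-- ===== PRECONDITION & SPEC =====
def Spec_split_domain_blocks_py (text : String) (out : List String) : Prop := out = split_domain_blocks_py_alt text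
instance (text : String) (out : List String) : Decidable (Spec_split_domain_blocks_py text out) := by unfold Spec_split_domain_blocks_py; infer_instance

-- ===== CLAIM (what is proved, stated in full; the proofs are below) =====
def Claim_equal_split_domain_blocks_py : Prop := ∀ (text : String), Dom_split_domain_blocks_py text → Spec_split_domain_blocks_py text (split_domain_blocks_py text)

-- ===== LEMMAS AND PROOFS =====

def pvMarker (ln : String) : Bool :=
  PySem.Str.startswith (PySem.Str.lower (PySem.Str.strip ln)) "domains:" ||
  PySem.Str.startswith (PySem.Str.lower (PySem.Str.strip ln)) "tech:"
def pvF (s : Int) (xs : List String) : List Int :=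
  ((PySem.List.enumerate xs s).filter (fun p => decide (0 < p.1) && pvMarker p.2)).map (·.1)

lemma pvF_nil_of_all (xs : List String) (s : Int)
    (h : ∀ x ∈ xs, pvMarker x = false) : pvF s xs = [] := by
  unfold pvF
  rw [List.filter_eq_nil_iff.mpr, List.map_nil]
  intro p hp
  rw [PySem.List.mem_enumerate_iff] at hp
  obtain ⟨k, hk, rfl⟩ := hp
  simp [h _ (List.getElem_mem hk)]

lemma pvF_append_of_all_false (xs : List String) (ys : List String) (s : Int)
    (h : ∀ x ∈ xs, pvMarker x = false) : pvF s (xs ++ ys) = pvF (s + xs.length) ys := by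
  induction xs generalizing s with
  | nil => simp [pvF]
  | cons x xs ih =>
      have hx := h x (by simp)
      have ih1 := ih (s + 1) (fun a ha => h a (by simp [ha]))
      unfold pvF at ih1 ⊢
      rw [List.cons_append, PySem.List.enumerate_cons, List.filter_cons]
      simp only [hx, Bool.and_false, Bool.false_eq_true, if_false]
      have e : s + ((x :: xs).length : Int) = s + 1 + (xs.length : Int) := by push_cast [List.length_cons]; ring
      rw [e, ih1]

lemma pvF_cons_marker (p : String) (post : List String) (s : Int) (hs : 0 < s)
    (hm : pvMarker p = true) : pvF s (p :: post) = s :: pvF (s + 1) post := by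
  unfold pvF
  rw [PySem.List.enumerate_cons, List.filter_cons]
  simp [hs, hm]

lemma pvF_shift (xs : List String) (s c : Int) (hs : 0 < s) (hc : 0 ≤ c) :
    pvF (s + c) xs = (pvF s xs).map (· + c) := by
  induction xs generalizing s with
  | nil => simp [pvF]
  | cons x xs ih =>
      have ih1 := ih (s + 1) (by omega)
      have e : s + 1 + c = s + c + 1 := by ring
      rw [e] at ih1
      unfold pvF at ih1 ⊢
      rw [PySem.List.enumerate_cons, PySem.List.enumerate_cons, List.filter_cons, List.filter_cons]
      have h1 : decide (0 < s + c) = true := by simp; omega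
      have h2 : decide (0 < s) = true := by simp [hs]
      rw [h1, h2]
      by_cases hm : pvMarker x = true
      · simp only [hm, Bool.and_true]
        rw [if_pos trivial, if_pos trivial, List.map_cons, List.map_cons, List.map_cons, ih1, List.map_map]
      · simp only [Bool.not_eq_true] at hm
        simp only [hm, Bool.and_false, Bool.false_eq_true, if_false]
        rw [ih1, List.map_map]

lemma pvF_pos (xs : List String) (s x : Int) (hx : x ∈ pvF s xs) : 0 < x := by
  unfold pvF at hx
  obtain ⟨p, hp, rfl⟩ := List.mem_map.mp hx
  have := (List.mem_filter.mp hp).2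
  simp at this
  exact this.1

lemma slice_shift {α : Type} (xs ys : List α) (a b : Int) (ha : 0 ≤ a) (hb : 0 ≤ b) :
    PySem.List.slice (xs ++ ys) (some (a + xs.length)) (some (b + xs.length)) =
      PySem.List.slice ys (some a) (some b) := by
  rw [PySem.List.slice_toNat _ (by omega) (by omega), PySem.List.slice_toNat _ ha hb]
  have h1 : (a + (xs.length : Int)).toNat = xs.length + a.toNat := by omega
  have h2 : (b + (xs.length : Int)).toNat - (xs.length + a.toNat) = b.toNat - a.toNat := by omega
  rw [h1, h2, List.drop_length_add_append]

def spanGroups : List String → List (List String)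
  | [] => []
  | l :: ls =>
      (l :: ls.takeWhile (fun x => !pvMarker x)) :: spanGroups (ls.dropWhile (fun x => !pvMarker x))
  termination_by ls => ls.length
  decreasing_by
    simp only [List.length_cons]
    exact Nat.lt_succ_of_le (List.length_dropWhile_le _ _)

lemma spanGroups_ne_nil (n : Nat) : ∀ (ls : List String),
    ls.length ≤ n → ∀ g ∈ spanGroups ls, g.isEmpty = false := by
  induction n with
  | zero =>
      intro ls h
      have : ls = [] := by cases ls <;> simp_all
      subst this; simp [spanGroups]
  | succ n ih =>
      intro ls h g hg
      cases ls with
      | nil => simp [spanGroups] at hg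
      | cons l rest =>
          rw [spanGroups] at hg
          rcases List.mem_cons.mp hg with rfl | hg'
          · simp
          · exact ih _ (by
              have := List.length_dropWhile_le (fun x => !pvMarker x) rest
              simp at h; omega) g hg'

lemma dropWhile_head_false {α : Type} (p : α → Bool) :
    ∀ (xs : List α) (y : α) (ys : List α), xs.dropWhile p = y :: ys → p y = false := by
  intro xs
  induction xs with
  | nil => intro y ys h; simp [List.dropWhile] at h
  | cons x xs ih =>
      intro y ys h
      by_cases hx : p x
      · rw [List.dropWhile_cons_of_pos hx] at h; exact ih y ys h
      · rw [List.dropWhile_cons_of_neg hx] at h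
        cases h; simpa using hx

def pvStepA (s : List (List String) × List String) (line : String) : List (List String) × List String :=
  let lower := PySem.Str.lower (PySem.Str.strip line)
  let starts_new := PySem.Str.startswith lower "domains:" || PySem.Str.startswith lower "tech:"
  if starts_new && !s.2.isEmpty then (s.1 ++ [s.2], [line]) else (s.1, s.2 ++ [line])

lemma foldA_eq (ls : List String) : ∀ (bs : List (List String)) (c : List String), c ≠ [] →
    (ls.foldl pvStepA (bs, c)).1 ++
        (if (ls.foldl pvStepA (bs, c)).2.isEmpty then [] else [(ls.foldl pvStepA (bs, c)).2])
      = bs ++ ((c ++ ls.takeWhile (fun x => !pvMarker x)) ::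
               spanGroups (ls.dropWhile (fun x => !pvMarker x))) := by
  induction ls with
  | nil =>
      intro bs c hc
      simp [List.isEmpty_iff, hc, spanGroups]
  | cons l ls ih =>
      intro bs c hc
      have hstep : pvStepA (bs, c) l =
          if pvMarker l then (bs ++ [c], [l]) else (bs, c ++ [l]) := by
        simp only [pvStepA, pvMarker, List.isEmpty_iff, hc]
        split_ifs with h1 h2 h2 <;> simp_all
      rw [List.foldl_cons, hstep]
      by_cases hm : pvMarker l = true
      · rw [if_pos hm]
        rw [ih (bs ++ [c]) [l] (by simp)]
        have ht : (l :: ls).takeWhile (fun x => !pvMarker x) = [] := by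
          simp [List.takeWhile_cons, hm]
        have hd : (l :: ls).dropWhile (fun x => !pvMarker x) = l :: ls := by
          simp [List.dropWhile_cons, hm]
        rw [ht, hd, spanGroups]
        simp
      · simp only [Bool.not_eq_true] at hm
        rw [if_neg (by simp [hm])]
        rw [ih bs (c ++ [l]) (by simp)]
        have ht : (l :: ls).takeWhile (fun x => !pvMarker x)
            = l :: ls.takeWhile (fun x => !pvMarker x) := by simp [List.takeWhile_cons, hm]
        have hd : (l :: ls).dropWhile (fun x => !pvMarker x)
            = ls.dropWhile (fun x => !pvMarker x) := by simp [List.dropWhile_cons, hm]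
        rw [ht, hd]
        simp

def pvSegs (ls : List String) : List String :=
  let idxs := ((PySem.List.enumerate ls 0).filter (fun p => decide (0 < p.1) && pvMarker p.2)).map (·.1)
  let bounds := 0 :: idxs ++ [(ls.length : Int)]
  (bounds.zip bounds.tail).map
    (fun p => PySem.Str.join "\n" (PySem.List.slice ls (some p.1) (some p.2)))

lemma idxs_cons (l : String) (rest : List String) :
    ((PySem.List.enumerate (l :: rest) 0).filter (fun p => decide (0 < p.1) && pvMarker p.2)).map (·.1)
      = pvF 1 rest := by
  rw [PySem.List.enumerate_cons, List.filter_cons]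
  norm_num [pvF]

lemma pairs_cons_map {α : Type} (g : α → α) (z x : α) (t : List α) :
    (z :: (x :: t).map g).zip ((z :: (x :: t).map g).tail)
      = (z, g x) :: (((x :: t).zip (x :: t).tail).map (Prod.map g g)) := by
  rw [← List.zip_map]
  rfl

set_option maxHeartbeats 4000000 in
lemma pvSegs_step (l p : String) (pre post' : List String)
    (hallpre : ∀ x ∈ pre, pvMarker x = false) (hmp : pvMarker p = true) :
    pvSegs (l :: (pre ++ p :: post'))
      = PySem.Str.join "\n" (l :: pre) :: pvSegs (p :: post') := by
  simp only [pvSegs]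
  rw [idxs_cons, idxs_cons]
  have hidx : pvF 1 (pre ++ p :: post')
      = ((1 : Int) + pre.length) :: (pvF 1 post').map (· + ((pre.length : Int) + 1)) := by
    rw [pvF_append_of_all_false _ _ _ hallpre, pvF_cons_marker _ _ _ (by omega) hmp]
    have e1 : (1 : Int) + pre.length + 1 = 1 + ((pre.length : Int) + 1) := by ring
    rw [e1, pvF_shift _ _ _ (by omega) (by omega)]
  rw [hidx]
  simp only [List.cons_append]
  have hlen : ((l :: (pre ++ p :: post')).length : Int)
      = ((p :: post').length : Int) + ((pre.length : Int) + 1) := by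
    push_cast [List.length_cons, List.length_append]; ring
  have hmap : ((1 : Int) + pre.length) ::
        ((pvF 1 post').map (· + ((pre.length : Int) + 1)) ++ [((l :: (pre ++ p :: post')).length : Int)])
      = (((0 : Int) :: (pvF 1 post' ++ [((p :: post').length : Int)])).map (· + ((pre.length : Int) + 1))) := by
    simp only [List.map_cons, List.map_append, List.map_singleton, List.map_nil]
    have e2 : (0 : Int) + ((pre.length : Int) + 1) = 1 + (pre.length : Int) := by ring
    rw [hlen, e2]
  rw [hmap, pairs_cons_map, List.map_cons, List.map_map]
  have hfirst : PySem.List.slice (l :: (pre ++ p :: post')) (some 0)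
        (some ((0 : Int) + ((pre.length : Int) + 1))) = l :: pre := by
    rw [PySem.List.slice_zero_start]
    have e : (0 : Int) + ((pre.length : Int) + 1) = (((pre.length + 1 : Nat)) : Int) := by push_cast; ring
    rw [e, PySem.List.slice_to_natCast, List.take_succ_cons, List.take_left]
  have hnn : ∀ x ∈ (0 : Int) :: (pvF 1 post' ++ [((p :: post').length : Int)]), 0 ≤ x := by
    intro x hx
    rcases List.mem_cons.mp hx with rfl | hx'
    · omega
    rcases List.mem_append.mp hx' with hx2 | hx2
    · have := pvF_pos _ _ _ hx2; omega
    · rcases List.mem_singleton.mp hx2 with rfl; positivity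
  refine congrArg₂ List.cons ?_ ?_
  · exact congrArg (PySem.Str.join "\n") hfirst
  · refine List.map_congr_left ?_
    rintro ⟨a, b⟩ hpr
    have hab := List.of_mem_zip hpr
    have ha : (0 : Int) ≤ a := hnn a hab.1
    have hb : (0 : Int) ≤ b := hnn b (List.mem_of_mem_tail hab.2)
    have hsplit : l :: (pre ++ p :: post') = (l :: pre) ++ (p :: post') := rfl
    have hlpre : ∀ c : Int, c + ((pre.length : Int) + 1) = c + ((l :: pre).length : Int) := by
      intro c; push_cast [List.length_cons]; ring
    show PySem.Str.join "\n" (PySem.List.slice (l :: (pre ++ p :: post'))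
        (some (a + ((pre.length : Int) + 1))) (some (b + ((pre.length : Int) + 1)))) = _
    rw [hlpre a, hlpre b, hsplit, slice_shift _ _ _ _ ha hb]

lemma pvSegs_eq (n : Nat) : ∀ (ls : List String), ls.length ≤ n → ls ≠ [] →
    pvSegs ls = (spanGroups ls).map (fun b => PySem.Str.join "\n" b) := by
  induction n with
  | zero =>
      intro ls h hne
      cases ls <;> simp_all
  | succ n ih =>
      intro ls h hne
      rcases ls with _ | ⟨l, rest⟩
      · exact absurd rfl hne
      clear hne
      rcases hpost : rest.dropWhile (fun x => !pvMarker x) with _ | ⟨p, post'⟩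
      · -- no marker after the first line: a single block
        have hrest : rest.takeWhile (fun x => !pvMarker x) = rest := by
          have := List.takeWhile_append_dropWhile (p := fun x => !pvMarker x) (l := rest)
          rwa [hpost, List.append_nil] at this
        have hall : ∀ x ∈ rest, pvMarker x = false := by
          intro x hx
          rw [← hrest] at hx
          have := List.mem_takeWhile_imp hx
          simpa using this
        simp only [pvSegs]
        rw [idxs_cons, pvF_nil_of_all _ _ hall]
        rw [spanGroups, hpost, hrest, spanGroups]
        simp only [List.nil_append, List.singleton_append, List.zip_cons_cons,
          List.tail_cons, List.zip_nil_right, List.map_cons, List.map_nil]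
        rw [PySem.List.slice_zero_start, PySem.List.slice_to_natCast, List.take_length]
      · -- the first marker in `rest` sits right after the takeWhile prefix
        have hmp : pvMarker p = true := by
          have := dropWhile_head_false (fun x => !pvMarker x) rest p post' hpost
          simpa using this
        have hrest : rest = rest.takeWhile (fun x => !pvMarker x) ++ p :: post' := by
          conv_lhs => rw [← List.takeWhile_append_dropWhile (p := fun x => !pvMarker x) (l := rest)]
          rw [hpost]
        have hallpre : ∀ x ∈ rest.takeWhile (fun x => !pvMarker x), pvMarker x = false := by
          intro x hx
          have := List.mem_takeWhile_imp hx
          simpa using this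
        have hlt : (p :: post').length ≤ n := by
          have hlr := congrArg List.length hrest
          simp only [List.length_append, List.length_cons] at hlr h ⊢
          omega
        conv_lhs => rw [hrest]
        rw [pvSegs_step _ _ _ _ hallpre hmp, ih _ hlt (by simp)]
        conv_rhs => rw [spanGroups, hpost]
        rw [List.map_cons]


-- ===== VERDICT (by name: the statement is the Claim_ definition above) =====
theorem split_domain_blocks_py_spec : Claim_equal_split_domain_blocks_py := by
  intro text _
  unfold Spec_split_domain_blocks_py
  simp only [split_domain_blocks_py, split_domain_blocks_py_alt]
  generalize (PySem.Str.splitlines text).filter (fun ln => PySem.Str.strip ln != "") = ls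
  cases ls with
  | nil => simp
  | cons l rest =>
      rw [if_neg (List.cons_ne_nil l rest), if_neg (show ¬((l :: rest).isEmpty = true) from by simp)]
      have hlam : (fun (s : List (List String) × List String) line =>
          let lower := PySem.Str.lower (PySem.Str.strip line)
          let starts_new := PySem.Str.startswith lower "domains:" || PySem.Str.startswith lower "tech:"
          if starts_new && !s.2.isEmpty then (s.1 ++ [s.2], [line]) else (s.1, s.2 ++ [line]))
          = pvStepA := rfl
      rw [hlam, List.foldl_cons]
      have hstep0 : pvStepA (([] : List (List String)), ([] : List String)) l = ([], [l]) := by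
        simp [pvStepA]
      rw [hstep0, foldA_eq rest [] [l] (by simp)]
      rw [List.nil_append, List.singleton_append]
      have hsg : spanGroups (l :: rest)
          = (l :: rest.takeWhile (fun x => !pvMarker x)) ::
            spanGroups (rest.dropWhile (fun x => !pvMarker x)) := by
        rw [spanGroups]
      rw [← hsg]
      rw [List.filter_eq_self.mpr (by
        intro g hg
        have := spanGroups_ne_nil (l :: rest).length (l :: rest) le_rfl g hg
        simp [this])]
      rw [← pvSegs_eq (l :: rest).length (l :: rest) le_rfl (by simp)]
      rfl
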